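-- pv_equiv track=rewrite | github.com/eddiepyang/sentimentizer | src/code/data.py | get_rating_set
-- ===== SOURCE A (Python) =====
-- def get_rating_set(corpus, stars):
--
--     mids = set()
--
--     def _get_mids():
--
--         for i, rating in enumerate(stars):
--             if rating is None:
--                 mids.add(i)
--
--     _get_mids()
--     filtered_corpus, filtered_stars = [], []
--
--     for i in range(len(corpus)):
--         if i in mids:
--             next
--         else:
--             filtered_corpus.append(corpus[i]), filtered_stars.append(stars[i])
--
--     return filtered_corpus, filtered_stars
-- ===== SOURCE B (Python) =====
-- def get_rating_set(corpus, stars):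
--     kept = [(text, rating) for text, rating in zip(corpus, stars) if rating is not None]
--     return [text for text, _ in kept], [rating for _, rating in kept]
-- ===== Notes on version B (the rewrite author's own statement) =====
-- stated objective: idiomatic
-- what changed: Replaces A's two staged index passes (a set of None-rated indices, then a range(len(corpus)) scan with membership tests and twin appends) by a pairwise pipeline: zip the two lists, filter the pairs whose rating is not None, and unzip the kept pairs into the two result lists.
import Mathlib
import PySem

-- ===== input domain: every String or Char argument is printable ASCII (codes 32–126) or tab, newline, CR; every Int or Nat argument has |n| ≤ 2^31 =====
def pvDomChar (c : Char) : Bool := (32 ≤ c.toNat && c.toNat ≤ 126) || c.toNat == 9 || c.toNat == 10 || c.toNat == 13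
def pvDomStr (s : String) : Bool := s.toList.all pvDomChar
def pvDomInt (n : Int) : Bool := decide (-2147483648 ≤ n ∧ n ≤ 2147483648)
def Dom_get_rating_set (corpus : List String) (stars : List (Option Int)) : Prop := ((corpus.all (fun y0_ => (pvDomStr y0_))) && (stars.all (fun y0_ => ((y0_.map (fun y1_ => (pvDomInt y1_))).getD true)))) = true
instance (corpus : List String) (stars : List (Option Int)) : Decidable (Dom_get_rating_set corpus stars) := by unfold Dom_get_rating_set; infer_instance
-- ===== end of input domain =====

-- B zips the two lists, filters pairs with a rating, and unzips, replacing A's set of None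
-- indices plus index scan; return value only.

-- ===== PORT A =====
def get_rating_set (corpus : List String) (stars : List (Option Int)) : List String × List (Option Int) :=
  -- mids = set(); for i, rating in enumerate(stars): if rating is None: mids.add(i)
  let mids : PySem.Set Int :=
    (PySem.List.enumerate stars 0).foldl
      (fun s p => if p.2 = none then PySem.Set.add s p.1 else s) PySem.Set.empty
  -- for i in range(len(corpus)): if i in mids: pass else: append corpus[i], stars[i]
  (PySem.List.pyRange 0 (corpus.length : Int) 1).foldl
    (fun acc i =>
      if PySem.Set.contains mids i then acc
      else
        match PySem.List.pyGet? corpus i, PySem.List.pyGet? stars i with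
        | some c, some r => (acc.1 ++ [c], acc.2 ++ [r])
        | _, _ => acc)   -- unreachable under Pre_ (IndexError in Python)
    ([], [])

-- ===== PORT B =====
def get_rating_set_alt (corpus : List String) (stars : List (Option Int)) : List String × List (Option Int) :=
  -- kept = [(text, rating) for text, rating in zip(corpus, stars) if rating is not None]
  let kept := (corpus.zip stars).filter (fun p => p.2 ≠ none)
  -- return [text for text, _ in kept], [rating for _, rating in kept]
  (kept.map Prod.fst, kept.map Prod.snd)

-- ===== PRECONDITION & SPEC =====
-- Pre_ excludes corpus longer than stars: there Python A raises IndexError on stars[i].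
def Pre_get_rating_set (corpus : List String) (stars : List (Option Int)) : Prop :=
  corpus.length ≤ stars.length
instance (corpus : List String) (stars : List (Option Int)) : Decidable (Pre_get_rating_set corpus stars) := by unfold Pre_get_rating_set; infer_instance

def pvWitness_get_rating_set : List String × List (Option Int) :=
  (["good", "bad"], [some 5, none, some 1])

def Spec_get_rating_set (corpus : List String) (stars : List (Option Int)) (out : List String × List (Option Int)) : Prop := out = get_rating_set_alt corpus stars
instance (corpus : List String) (stars : List (Option Int)) (out : List String × List (Option Int)) : Decidable (Spec_get_rating_set corpus stars out) := by unfold Spec_get_rating_set; infer_instance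

-- ===== CLAIM (what is proved, stated in full; the proofs are below) =====
def Claim_equal_get_rating_set : Prop := ∀ (corpus : List String) (stars : List (Option Int)), Dom_get_rating_set corpus stars → Pre_get_rating_set corpus stars → Spec_get_rating_set corpus stars (get_rating_set corpus stars)

-- ===== LEMMAS AND PROOFS =====

-- membership in the fold that builds `mids`
lemma mem_mids_foldl (l : List (Int × Option Int)) (s0 : PySem.Set Int) (x : Int) :
    x ∈ l.foldl (fun s p => if p.2 = none then PySem.Set.add s p.1 else s) s0 ↔
      x ∈ s0 ∨ ∃ p ∈ l, p.2 = none ∧ x = p.1 := by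
  induction l generalizing s0 with
  | nil => simp
  | cons h t ih =>
    simp only [List.foldl_cons, ih, List.mem_cons]
    split_ifs with hn
    · rw [PySem.Set.mem_add]
      constructor
      · rintro (⟨h1 | h1⟩ | ⟨p, hp, h2, h3⟩)
        · exact Or.inl h1
        · exact Or.inr ⟨h, Or.inl rfl, hn, h1⟩
        · exact Or.inr ⟨p, Or.inr hp, h2, h3⟩
      · rintro (h1 | ⟨p, (rfl | hp), h2, h3⟩)
        · exact Or.inl (Or.inl h1)
        · exact Or.inl (Or.inr h3)
        · exact Or.inr ⟨p, hp, h2, h3⟩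
    · constructor
      · rintro (h1 | ⟨p, hp, h2, h3⟩)
        · exact Or.inl h1
        · exact Or.inr ⟨p, Or.inr hp, h2, h3⟩
      · rintro (h1 | ⟨p, (rfl | hp), h2, h3⟩)
        · exact Or.inl h1
        · exact absurd h2 hn
        · exact Or.inr ⟨p, hp, h2, h3⟩

lemma mids_char (stars : List (Option Int)) (i : Int) :
    (i ∈ (PySem.List.enumerate stars 0).foldl
        (fun s p => if p.2 = none then PySem.Set.add s p.1 else s) PySem.Set.empty) ↔
      ∃ (k : Nat) (h : k < stars.length), stars[k] = none ∧ i = (k : Int) := by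
  rw [mem_mids_foldl]
  constructor
  · rintro (h | ⟨p, hp, h2, h3⟩)
    · simp [PySem.Set.empty] at h
    · rw [PySem.List.mem_enumerate_iff] at hp
      obtain ⟨k, hk, rfl⟩ := hp
      exact ⟨k, hk, h2, by simpa using h3⟩
  · rintro ⟨k, hk, hn, rfl⟩
    refine Or.inr ⟨((k : Int), stars[k]), ?_, hn, by simp⟩
    rw [PySem.List.mem_enumerate_iff]
    exact ⟨k, hk, by simp⟩

-- contains on mids decides "stars[j] = none" for an in-range index
lemma contains_mids (stars : List (Option Int)) (j : Nat) (hj : j < stars.length) :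
    PySem.Set.contains
      ((PySem.List.enumerate stars 0).foldl
        (fun s p => if p.2 = none then PySem.Set.add s p.1 else s) PySem.Set.empty)
      ((j : Nat) : Int) = decide (stars[j] = none) := by
  rcases h : decide (stars[j] = none) with _ | _
  · simp only [decide_eq_false_iff_not] at h
    apply Bool.eq_false_iff.mpr
    intro hc
    rw [PySem.Set.contains_iff, mids_char] at hc
    obtain ⟨k, hk, hkn, hke⟩ := hc
    have : k = j := by omega
    exact h (this ▸ hkn)
  · simp only [decide_eq_true_eq] at h
    rw [PySem.Set.contains_iff, mids_char]
    exact ⟨j, hj, h, rfl⟩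

-- A's second loop, cut at index n, builds exactly the filtered-zip prefix
lemma fold_prefix (corpus : List String) (stars : List (Option Int))
    (hpre : corpus.length ≤ stars.length) (n : Nat) (hn : n ≤ corpus.length) :
    (PySem.List.pyRange 0 (n : Int) 1).foldl
      (fun acc i =>
        if PySem.Set.contains
            ((PySem.List.enumerate stars 0).foldl
              (fun s p => if p.2 = none then PySem.Set.add s p.1 else s) PySem.Set.empty) i then acc
        else
          match PySem.List.pyGet? corpus i, PySem.List.pyGet? stars i with
          | some c, some r => (acc.1 ++ [c], acc.2 ++ [r])
          | _, _ => acc)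
      ([], []) =
    ((((corpus.take n).zip (stars.take n)).filter (fun p => p.2 ≠ none)).map Prod.fst,
     (((corpus.take n).zip (stars.take n)).filter (fun p => p.2 ≠ none)).map Prod.snd) := by
  induction n with
  | zero => simp [PySem.List.pyRange]
  | succ m ih =>
    have hm : m ≤ corpus.length := by omega
    have hmc : m < corpus.length := by omega
    have hms : m < stars.length := by omega
    have hsplit : PySem.List.pyRange 0 ((m + 1 : Nat) : Int) 1
        = PySem.List.pyRange 0 (m : Int) 1 ++ [(m : Int)] := by
      push_cast
      exact PySem.List.pyRange_one_succ_right (by positivity)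
    rw [hsplit, List.foldl_append, ih hm]
    have hget_c : PySem.List.pyGet? corpus ((m : Nat) : Int) = some corpus[m] := by
      rw [PySem.List.pyGet?_natCast, List.getElem?_eq_getElem hmc]
    have hget_s : PySem.List.pyGet? stars ((m : Nat) : Int) = some stars[m] := by
      rw [PySem.List.pyGet?_natCast, List.getElem?_eq_getElem hms]
    have htc : corpus.take (m + 1) = corpus.take m ++ [corpus[m]] := by
      rw [List.take_add_one, List.getElem?_eq_getElem hmc]; rfl
    have hts : stars.take (m + 1) = stars.take m ++ [stars[m]] := by
      rw [List.take_add_one, List.getElem?_eq_getElem hms]; rfl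
    have hlen : (corpus.take m).length = (stars.take m).length := by
      simp [List.length_take]; omega
    rw [List.foldl_cons, List.foldl_nil, contains_mids stars m hms, hget_c, hget_s,
      htc, hts, List.zip_append hlen]
    by_cases hnone : stars[m] = none <;>
      simp [hnone, List.filter_append]

-- ===== VERDICT (by name: the statement is the Claim_ definition above) =====
theorem get_rating_set_spec : Claim_equal_get_rating_set := by
  intro corpus stars _ hpre
  unfold Pre_get_rating_set at hpre
  unfold Spec_get_rating_set get_rating_set get_rating_set_alt
  have h := fold_prefix corpus stars hpre corpus.length le_rfl
  rw [h]
  have hmin : min corpus.length stars.length = corpus.length := by omega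
  have hz : corpus.zip stars = (corpus.take corpus.length).zip (stars.take corpus.length) := by
    rw [List.zip_eq_zip_take_min, hmin]
  rw [hz]
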